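-- pv_equiv track=rewrite | github.com/UnkLegacy/TailScaleStatusListener | devicechecker.py | find_device
-- ===== SOURCE A (Python) =====
-- from typing import List, Dict, Optional
--
-- def find_device(devices: List[Dict], hostname: str) -> Optional[Dict]:
--     """Find a device by hostname in the device list"""
--     # First try exact hostname match
--     device = next((d for d in devices if d["hostname"].lower() == hostname.lower()), None)
--
--     if not device:
--         # Try matching the first part of the name (before the first dot)
--         device = next(
--             (d for d in devices if d.get("name", "").split(".")[0].lower() == hostname.lower()),
--             None
--         )
--
--     return device
-- ===== SOURCE B (Python) =====
-- from typing import List, Dict, Optional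
--
-- def find_device(devices: List[Dict], hostname: str) -> Optional[Dict]:
--     """Find a device by hostname in the device list"""
--     target = hostname.lower()
--     exact = None
--     prefix = None
--     for d in devices:
--         if exact is None and d.get("hostname", "").lower() == target:
--             exact = d
--         if prefix is None and d.get("name", "").split(".")[0].lower() == target:
--             prefix = d
--     return exact if exact is not None else prefix
-- ===== Notes on version B (the rewrite author's own statement) =====
-- stated objective: alternative
-- what changed: Replaces A's two next(...) generator scans by a single fold-style pass that accumulates the first exact-hostname match and the first name-prefix match in two accumulators and combines them afterwards.
-- outside the precondition, e.g. on find_device([{'name': 'gw.tail.net'}], 'gw'): A raises KeyError, B returns {'name': 'gw.tail.net'}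
import Mathlib
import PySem

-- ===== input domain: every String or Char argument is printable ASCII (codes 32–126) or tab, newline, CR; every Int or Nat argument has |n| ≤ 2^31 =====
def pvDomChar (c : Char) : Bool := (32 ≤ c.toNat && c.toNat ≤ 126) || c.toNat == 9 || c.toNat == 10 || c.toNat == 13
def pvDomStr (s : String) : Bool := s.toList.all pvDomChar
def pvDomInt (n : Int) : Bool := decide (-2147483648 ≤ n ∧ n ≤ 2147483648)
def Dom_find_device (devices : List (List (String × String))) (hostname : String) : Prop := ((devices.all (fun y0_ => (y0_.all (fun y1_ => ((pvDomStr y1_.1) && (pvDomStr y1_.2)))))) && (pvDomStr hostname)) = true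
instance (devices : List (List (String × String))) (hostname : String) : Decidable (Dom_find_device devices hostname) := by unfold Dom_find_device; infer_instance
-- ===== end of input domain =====

-- One honest line: B replaces A's two next(...) scans by a single fold accumulating the first
-- exact match and the first name-prefix match; same return values on Pre_ (A's KeyError inputs excluded).

-- ===== PORT A =====
-- d.get("name", "").split(".")[0].lower() == hostname.lower()  (A's second generator's predicate)
def pvNameMatch (d : List (String × String)) (hostname : String) : Bool :=
  PySem.Str.lower (((PySem.Str.split? ((List.lookup "name" d).getD "") ".").getD []).headD "")
    == PySem.Str.lower hostname

-- A's first next(...): some (some d) = first exact match, some none = exhausted,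
-- none = KeyError (d["hostname"] missing; excluded by Pre_find_device)
def pvScanExact : List (List (String × String)) → String → Option (Option (List (String × String)))
  | [], _ => some none
  | d :: rest, hostname =>
    match List.lookup "hostname" d with
    | none => none
    | some v =>
      if PySem.Str.lower v == PySem.Str.lower hostname then some (some d)
      else pvScanExact rest hostname

def find_device (devices : List (List (String × String))) (hostname : String) : Option (List (String × String)) :=
  match pvScanExact devices hostname with
  | none => none  -- KeyError: outside Pre_find_device
  | some (some d) => some d
  | some none => devices.find? (fun d => pvNameMatch d hostname)

-- ===== PORT B =====
-- d.get("hostname", "").lower() == target  (B's first accumulator's test; target pre-lowered)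
def pvExactB (d : List (String × String)) (target : String) : Bool :=
  PySem.Str.lower ((List.lookup "hostname" d).getD "") == target

-- d.get("name", "").split(".")[0].lower() == target
def pvNameB (d : List (String × String)) (target : String) : Bool :=
  PySem.Str.lower (((PySem.Str.split? ((List.lookup "name" d).getD "") ".").getD []).headD "") == target

-- Source B's loop body: keep the first device satisfying each test in its accumulator
def pvStepB (target : String)
    (acc : Option (List (String × String)) × Option (List (String × String)))
    (d : List (String × String)) :
    Option (List (String × String)) × Option (List (String × String)) :=
  (if acc.1.isNone && pvExactB d target then some d else acc.1,
   if acc.2.isNone && pvNameB d target then some d else acc.2)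

def find_device_alt (devices : List (List (String × String))) (hostname : String) : Option (List (String × String)) :=
  let target := PySem.Str.lower hostname
  let acc := devices.foldl (pvStepB target) (none, none)
  match acc.1 with
  | some e => some e
  | none => acc.2

-- ===== PRECONDITION & SPEC =====
-- "hostname".lower() == hostname.lower() on a device dict d, False when the key is absent
def pvExact (d : List (String × String)) (hostname : String) : Bool :=
  match List.lookup "hostname" d with
  | some v => PySem.Str.lower v == PySem.Str.lower hostname
  | none => false

-- Pre_ excludes exactly the inputs on which Python A raises KeyError: a device without a
-- "hostname" key that is scanned before any exact match occurs.
def Pre_find_device (devices : List (List (String × String))) (hostname : String) : Prop :=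
  ∀ i, i < devices.length →
    (List.lookup "hostname" (devices.getD i []) ≠ none ∨
     ∃ j, j < i ∧ pvExact (devices.getD j []) hostname = true)
instance (devices : List (List (String × String))) (hostname : String) : Decidable (Pre_find_device devices hostname) := by unfold Pre_find_device; infer_instance

def pvWitness_find_device : (List (List (String × String))) × String :=
  ([[("hostname", "Gw"), ("name", "pi")], [("name", "gw.tail.net")]], "GW")

def Spec_find_device (devices : List (List (String × String))) (hostname : String) (out : Option (List (String × String))) : Prop := out = find_device_alt devices hostname
instance (devices : List (List (String × String))) (hostname : String) (out : Option (List (String × String))) : Decidable (Spec_find_device devices hostname out) := by unfold Spec_find_device; infer_instance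

-- ===== CLAIM (what is proved, stated in full; the proofs are below) =====
def Claim_equal_find_device : Prop := ∀ (devices : List (List (String × String))) (hostname : String), Dom_find_device devices hostname → Pre_find_device devices hostname → Spec_find_device devices hostname (find_device devices hostname)

-- ===== LEMMAS AND PROOFS =====

-- dropping a non-exact head preserves the precondition
theorem pre_tail (d : List (String × String)) (rest : List (List (String × String))) (hostname : String)
    (hpre : Pre_find_device (d :: rest) hostname) (hne : pvExact d hostname = false) :
    Pre_find_device rest hostname := by
  intro i hi
  have h := hpre (i + 1) (by simpa using Nat.succ_lt_succ hi)
  rcases h with h | ⟨j, hj, hx⟩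
  · left; simpa using h
  · right
    rcases j with _ | k
    · simp at hx; rw [hx] at hne; cases hne
    · exact ⟨k, by omega, by simpa using hx⟩

-- B's fold is characterised by first-match searches on the remaining list
theorem foldB_char (target : String) (l : List (List (String × String)))
    (e f : Option (List (String × String))) :
    l.foldl (pvStepB target) (e, f) =
      (e.or (l.find? (fun d => pvExactB d target)),
       f.or (l.find? (fun d => pvNameB d target))) := by
  induction l generalizing e f with
  | nil => simp
  | cons d rest ih =>
    simp only [List.foldl_cons, pvStepB]
    rw [ih]
    cases e <;> cases f <;>
      by_cases h1 : pvExactB d target = true <;>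
      by_cases h2 : pvNameB d target = true <;>
      simp [List.find?, h1, h2]

-- under Pre_, A's first scan agrees with B's get-based first-match search
theorem scanA_char (devices : List (List (String × String))) (hostname : String)
    (hpre : Pre_find_device devices hostname) :
    pvScanExact devices hostname =
      some (devices.find? (fun d => pvExactB d (PySem.Str.lower hostname))) := by
  induction devices with
  | nil => simp [pvScanExact]
  | cons d rest ih =>
    have h0 := hpre 0 (by simp)
    have hkey : List.lookup "hostname" d ≠ none := by
      rcases h0 with h0 | ⟨j, hj, _⟩
      · simpa using h0
      · omega
    cases hv : List.lookup "hostname" d with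
    | none => exact absurd hv hkey
    | some v =>
      have hB : pvExactB d (PySem.Str.lower hostname) = (PySem.Str.lower v == PySem.Str.lower hostname) := by
        simp [pvExactB, hv]
      by_cases he : (PySem.Str.lower v == PySem.Str.lower hostname) = true
      · simp [pvScanExact, hv, he, List.find?, hB]
      · have hpre' : Pre_find_device rest hostname :=
          pre_tail d rest hostname hpre (by simp [pvExact, hv, he])
        have := ih hpre'
        simp only [pvScanExact, hv, he, List.find?, hB]
        simpa [he] using this

-- A's second predicate is B's with the target pre-lowered
theorem nameMatch_eq (d : List (String × String)) (hostname : String) :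
    pvNameMatch d hostname = pvNameB d (PySem.Str.lower hostname) := rfl

theorem main_eq (devices : List (List (String × String))) (hostname : String)
    (hpre : Pre_find_device devices hostname) :
    find_device devices hostname = find_device_alt devices hostname := by
  unfold find_device find_device_alt
  rw [scanA_char devices hostname hpre]
  simp only [foldB_char, Option.or, nameMatch_eq]
  cases devices.find? (fun d => pvExactB d (PySem.Str.lower hostname)) <;> rfl

-- ===== VERDICT (by name: the statement is the Claim_ definition above) =====
theorem find_device_spec : Claim_equal_find_device := by
  intro devices hostname _ hpre
  exact main_eq devices hostname hpre
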